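-- pv_equiv track=rewrite | github.com/JamesArhy/gtnh-calc | backend/app/graph_store.py | _build_downstream_recipe_cypher
-- ===== SOURCE A (Python) =====
-- from typing import Any, Dict, Iterable, List, Optional, Tuple
--
-- def _build_downstream_recipe_cypher(
--     start_match: str,
--     target_match: str,
--     input_rel: str,
--     max_depth: int,
--     with_machine_filter: bool,
-- ) -> str:
--     depth = max(1, int(max_depth))
--     recipe_node = "r1:Recipe {machine_id: $machine_id}" if with_machine_filter else "r1:Recipe"
--     blocks: List[str] = []
--     for step_count in range(1, depth + 1):
--         pattern = f"(start)-[:{input_rel}]->({recipe_node})"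
--         for step in range(1, step_count):
--             pattern += (
--                 f"-[:OUTPUT_ITEM|OUTPUT_FLUID]->(n{step})"
--                 "-[:INPUT_ITEM|INPUT_FLUID]->"
--                 f"(r{step + 1}:Recipe)"
--             )
--         pattern += "-[:OUTPUT_ITEM|OUTPUT_FLUID]->(target)"
--         block = (
--             f"MATCH {start_match} "
--             f"MATCH {target_match} "
--             f"MATCH {pattern} "
--             "RETURN DISTINCT r1.rid AS rid, r1.machine_id AS machine_id, "
--             "r1.duration_ticks AS duration_ticks, r1.eut AS eut "
--             "LIMIT $limit"
--         )
--         blocks.append(block)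
--     return "\nUNION\n".join(blocks)
-- ===== SOURCE B (Python) =====
-- def _build_downstream_recipe_cypher(
--     start_match: str,
--     target_match: str,
--     input_rel: str,
--     max_depth: int,
--     with_machine_filter: bool,
-- ) -> str:
--     depth = max(1, int(max_depth))
--     recipe_node = "r1:Recipe {machine_id: $machine_id}" if with_machine_filter else "r1:Recipe"
--     core = f"(start)-[:{input_rel}]->({recipe_node})"
--     blocks = []
--     for step_count in range(1, depth + 1):
--         blocks.append(
--             f"MATCH {start_match} "
--             f"MATCH {target_match} "
--             f"MATCH {core}-[:OUTPUT_ITEM|OUTPUT_FLUID]->(target) "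
--             "RETURN DISTINCT r1.rid AS rid, r1.machine_id AS machine_id, "
--             "r1.duration_ticks AS duration_ticks, r1.eut AS eut "
--             "LIMIT $limit"
--         )
--         core += (
--             f"-[:OUTPUT_ITEM|OUTPUT_FLUID]->(n{step_count})"
--             "-[:INPUT_ITEM|INPUT_FLUID]->"
--             f"(r{step_count + 1}:Recipe)"
--         )
--     return "\nUNION\n".join(blocks)
-- ===== Notes on version B (the rewrite author's own statement) =====
-- stated objective: faster
-- what changed: Replaces the nested rebuild (inner loop re-deriving the whole path prefix for every depth) with a single flat loop that maintains one growing core pattern string, emitting a block then extending the core each iteration.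
import Mathlib
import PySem

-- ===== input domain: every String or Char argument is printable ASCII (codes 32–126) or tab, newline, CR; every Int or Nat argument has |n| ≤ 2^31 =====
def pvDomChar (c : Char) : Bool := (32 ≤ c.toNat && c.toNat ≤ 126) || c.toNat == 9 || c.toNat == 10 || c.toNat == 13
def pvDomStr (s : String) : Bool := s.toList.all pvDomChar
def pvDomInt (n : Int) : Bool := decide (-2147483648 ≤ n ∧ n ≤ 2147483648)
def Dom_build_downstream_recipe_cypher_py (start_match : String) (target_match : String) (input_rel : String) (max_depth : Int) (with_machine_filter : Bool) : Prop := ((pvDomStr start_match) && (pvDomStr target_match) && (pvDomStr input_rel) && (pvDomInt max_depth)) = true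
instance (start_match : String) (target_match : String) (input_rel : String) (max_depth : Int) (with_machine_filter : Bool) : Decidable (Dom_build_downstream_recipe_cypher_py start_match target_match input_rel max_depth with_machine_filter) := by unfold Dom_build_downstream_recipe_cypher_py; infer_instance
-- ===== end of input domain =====

-- B builds the UNION query with a single flat loop extending one growing core pattern
-- instead of A's nested rebuild of the whole prefix for every depth (alternative decomposition, same output).

-- ===== PORT A =====
def build_downstream_recipe_cypher_py (start_match : String) (target_match : String) (input_rel : String) (max_depth : Int) (with_machine_filter : Bool) : String :=
  let depth : Int := max 1 max_depth
  let recipe_node := if with_machine_filter then "r1:Recipe {machine_id: $machine_id}" else "r1:Recipe"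
  let blocks := (PySem.List.pyRange 1 (depth + 1) 1).foldl (fun blocks step_count =>
    let pattern := "(start)-[:" ++ input_rel ++ "]->(" ++ recipe_node ++ ")"
    let pattern := (PySem.List.pyRange 1 step_count 1).foldl (fun p step =>
      p ++ ("-[:OUTPUT_ITEM|OUTPUT_FLUID]->(n" ++ PySem.Int.toStr step ++ ")-[:INPUT_ITEM|INPUT_FLUID]->(r" ++ PySem.Int.toStr (step + 1) ++ ":Recipe)")) pattern
    let pattern := pattern ++ "-[:OUTPUT_ITEM|OUTPUT_FLUID]->(target)"
    let block := "MATCH " ++ start_match ++ " MATCH " ++ target_match ++ " MATCH " ++ pattern ++ " RETURN DISTINCT r1.rid AS rid, r1.machine_id AS machine_id, r1.duration_ticks AS duration_ticks, r1.eut AS eut LIMIT $limit"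
    blocks ++ [block]) ([] : List String)
  PySem.Str.join "\nUNION\n" blocks

-- ===== PORT B =====
-- the flat loop of Source B: emit a block from the current core, then extend the core
def pvAltLoop (start_match : String) (target_match : String) : Nat → Int → String → List String → List String
  | 0, _, _, blocks => blocks
  | k + 1, step_count, core, blocks =>
    let block := "MATCH " ++ start_match ++ " MATCH " ++ target_match ++ " MATCH " ++ (core ++ "-[:OUTPUT_ITEM|OUTPUT_FLUID]->(target)") ++ " RETURN DISTINCT r1.rid AS rid, r1.machine_id AS machine_id, r1.duration_ticks AS duration_ticks, r1.eut AS eut LIMIT $limit"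
    pvAltLoop start_match target_match k (step_count + 1)
      (core ++ ("-[:OUTPUT_ITEM|OUTPUT_FLUID]->(n" ++ PySem.Int.toStr step_count ++ ")-[:INPUT_ITEM|INPUT_FLUID]->(r" ++ PySem.Int.toStr (step_count + 1) ++ ":Recipe)"))
      (blocks ++ [block])

def build_downstream_recipe_cypher_py_alt (start_match : String) (target_match : String) (input_rel : String) (max_depth : Int) (with_machine_filter : Bool) : String :=
  let depth : Int := max 1 max_depth
  let recipe_node := if with_machine_filter then "r1:Recipe {machine_id: $machine_id}" else "r1:Recipe"
  let core := "(start)-[:" ++ input_rel ++ "]->(" ++ recipe_node ++ ")"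
  PySem.Str.join "\nUNION\n" (pvAltLoop start_match target_match depth.toNat 1 core [])

-- ===== PRECONDITION & SPEC =====
def Spec_build_downstream_recipe_cypher_py (start_match : String) (target_match : String) (input_rel : String) (max_depth : Int) (with_machine_filter : Bool) (out : String) : Prop := out = build_downstream_recipe_cypher_py_alt start_match target_match input_rel max_depth with_machine_filter
instance (start_match : String) (target_match : String) (input_rel : String) (max_depth : Int) (with_machine_filter : Bool) (out : String) : Decidable (Spec_build_downstream_recipe_cypher_py start_match target_match input_rel max_depth with_machine_filter out) := by unfold Spec_build_downstream_recipe_cypher_py; infer_instance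

-- ===== CLAIM (what is proved, stated in full; the proofs are below) =====
def Claim_equal_build_downstream_recipe_cypher_py : Prop := ∀ (start_match : String) (target_match : String) (input_rel : String) (max_depth : Int) (with_machine_filter : Bool), Dom_build_downstream_recipe_cypher_py start_match target_match input_rel max_depth with_machine_filter → Spec_build_downstream_recipe_cypher_py start_match target_match input_rel max_depth with_machine_filter (build_downstream_recipe_cypher_py start_match target_match input_rel max_depth with_machine_filter)

-- ===== LEMMAS AND PROOFS =====

-- the middle path segment for step i
def pvMid (i : Int) : String := "-[:OUTPUT_ITEM|OUTPUT_FLUID]->(n" ++ PySem.Int.toStr i ++ ")-[:INPUT_ITEM|INPUT_FLUID]->(r" ++ PySem.Int.toStr (i + 1) ++ ":Recipe)"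

-- a full UNION block from a core pattern
def pvBlk (sm : String) (tm : String) (pat : String) : String := "MATCH " ++ sm ++ " MATCH " ++ tm ++ " MATCH " ++ (pat ++ "-[:OUTPUT_ITEM|OUTPUT_FLUID]->(target)") ++ " RETURN DISTINCT r1.rid AS rid, r1.machine_id AS machine_id, r1.duration_ticks AS duration_ticks, r1.eut AS eut LIMIT $limit"

-- the list of successive core patterns starting from `base` at step index `s`
def pvPats : String → Int → Nat → List String
  | _, _, 0 => []
  | base, s, k + 1 => base :: pvPats (base ++ pvMid s) (s + 1) k

lemma pvAltLoop_eq (sm tm : String) : ∀ (k : Nat) (s : Int) (core : String) (blocks : List String),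
    pvAltLoop sm tm k s core blocks = blocks ++ (pvPats core s k).map (pvBlk sm tm) := by
  intro k
  induction k with
  | zero => intro s core blocks; simp [pvAltLoop, pvPats]
  | succ k ih =>
    intro s core blocks
    simp [pvAltLoop, pvPats, ih, pvBlk, pvMid, List.append_assoc]

lemma pv_foldl_push (f : Int → String) : ∀ (l : List Int) (init : List String),
    l.foldl (fun acc x => acc ++ [f x]) init = init ++ l.map f := by
  intro l
  induction l with
  | nil => simp
  | cons a l ih => intro init; simp [ih, List.append_assoc]

lemma pv_map_fold_eq_pats : ∀ (k : Nat) (a : Int) (base : String),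
    (PySem.List.pyRange a (a + k) 1).map
      (fun s => (PySem.List.pyRange a s 1).foldl (fun p i => p ++ pvMid i) base)
      = pvPats base a k := by
  intro k
  induction k with
  | zero => intro a base; simp [PySem.List.pyRange_one_eq_nil, pvPats]
  | succ k ih =>
    intro a base
    have hlt : a < a + (k + 1 : Nat) := by push_cast; omega
    rw [PySem.List.pyRange_one_cons hlt, List.map_cons]
    have h0 : (PySem.List.pyRange a a 1) = [] := PySem.List.pyRange_one_eq_nil le_rfl
    rw [h0]
    have htail : (PySem.List.pyRange (a + 1) (a + (k + 1 : Nat)) 1).map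
        (fun s => (PySem.List.pyRange a s 1).foldl (fun p i => p ++ pvMid i) base)
        = pvPats (base ++ pvMid a) (a + 1) k := by
      have hcong : ∀ s ∈ PySem.List.pyRange (a + 1) (a + (k + 1 : Nat)) 1,
          (PySem.List.pyRange a s 1).foldl (fun p i => p ++ pvMid i) base
            = (PySem.List.pyRange (a + 1) s 1).foldl (fun p i => p ++ pvMid i) (base ++ pvMid a) := by
        intro s hs
        have hmem := (PySem.List.mem_pyRange_one).1 hs
        have : a < s := by omega
        rw [PySem.List.pyRange_one_cons this, List.foldl_cons]
      rw [List.map_congr_left hcong]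
      have harg : a + (k + 1 : Nat) = (a + 1) + (k : Nat) := by push_cast; omega
      rw [harg, ih (a + 1) (base ++ pvMid a)]
    rw [htail]
    simp [pvPats, List.foldl_nil]

-- ===== VERDICT (by name: the statement is the Claim_ definition above) =====
theorem build_downstream_recipe_cypher_py_spec : Claim_equal_build_downstream_recipe_cypher_py := by
  intro sm tm ir md wmf _dom
  unfold Spec_build_downstream_recipe_cypher_py
  unfold build_downstream_recipe_cypher_py build_downstream_recipe_cypher_py_alt
  dsimp only
  have hd : (1 : Int) ≤ max 1 md := le_max_left 1 md
  have hrange : max 1 md + 1 = 1 + ((max 1 md).toNat : Int) := by omega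
  rw [pvAltLoop_eq]
  set rn := if wmf then "r1:Recipe {machine_id: $machine_id}" else "r1:Recipe" with hrn
  have key : (PySem.List.pyRange 1 (max 1 md + 1) 1).foldl (fun blocks step_count =>
      blocks ++ [pvBlk sm tm ((PySem.List.pyRange 1 step_count 1).foldl (fun p i => p ++ pvMid i)
        ("(start)-[:" ++ ir ++ "]->(" ++ rn ++ ")"))]) ([] : List String)
      = (pvPats ("(start)-[:" ++ ir ++ "]->(" ++ rn ++ ")") 1 (max 1 md).toNat).map (pvBlk sm tm) := by
    rw [pv_foldl_push (fun s => pvBlk sm tm ((PySem.List.pyRange 1 s 1).foldl (fun p i => p ++ pvMid i) ("(start)-[:" ++ ir ++ "]->(" ++ rn ++ ")")))]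
    rw [List.nil_append]
    rw [hrange, ← pv_map_fold_eq_pats ((max 1 md).toNat) 1 ("(start)-[:" ++ ir ++ "]->(" ++ rn ++ ")"), List.map_map]
    rfl
  simp only [pvBlk, pvMid] at key
  rw [List.nil_append]
  exact congrArg (PySem.Str.join "\nUNION\n") key
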